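-- pv_equiv track=rewrite | github.com/uaf-arctic-eco-modeling/dvm-dos-tem | scripts/param_util.py | csv_v0_get_section
-- ===== SOURCE A (Python) =====
-- def csv_v0_get_section(data, start):
--   '''
--   Extracts a section of block of data from a specially formatted csv file.
--
--   Assumes that `data` is a list of lines read from a csv file. See help
--   (the docstring) for the csv_v0_specification() function to get more details
--   on how the csv file should be setup.
--
--   Parameters
--   ----------
--   data : list of strings, required
--     Assumed to be a list generated by reading a csv file that is formatted as
--     described in the docstring for csv_v0_specification()
--   start:
--     The index in the `data` list where the section starts.
--
--   Returns
--   -------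
--   The list of lines (rows) from `data` that belongs to a section or block.
--   '''
--   sectiondata = []
--   for row in data[start:]:
--     row = [x.strip() for x in row.split(',')]
--     if all(x=='' for x in row):
--       break
--     else:
--       sectiondata.append(row)
--   return sectiondata
-- ===== SOURCE B (Python) =====
-- def csv_v0_get_section(data, start):
--   tail = data[start:]
--   parsed = [[x.strip() for x in row.split(',')] for row in tail]
--   n = next((i for i, row in enumerate(parsed) if all(x == '' for x in row)), len(parsed))
--   return parsed[:n]
-- ===== Notes on version B (the rewrite author's own statement) =====
-- stated objective: idiomatic
-- what changed: Replaces the fused append-and-break loop by two declarative passes: parse every row of data[start:] with a comprehension, locate the first all-empty parsed row with next(enumerate(...)), and return the slice up to it.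
import Mathlib
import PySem

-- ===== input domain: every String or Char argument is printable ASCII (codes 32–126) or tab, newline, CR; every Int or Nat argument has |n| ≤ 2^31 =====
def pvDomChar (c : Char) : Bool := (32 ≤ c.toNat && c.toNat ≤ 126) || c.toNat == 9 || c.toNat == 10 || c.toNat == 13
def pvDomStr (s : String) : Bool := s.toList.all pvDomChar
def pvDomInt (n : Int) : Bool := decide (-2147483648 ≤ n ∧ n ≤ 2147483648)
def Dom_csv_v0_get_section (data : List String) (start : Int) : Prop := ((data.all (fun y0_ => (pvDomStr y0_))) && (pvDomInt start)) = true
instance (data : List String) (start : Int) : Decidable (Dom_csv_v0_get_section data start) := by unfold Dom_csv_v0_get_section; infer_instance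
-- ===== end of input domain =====

-- B replaces A's fused parse-append-break loop by two declarative passes (parse all of data[start:], then truncate at the first all-empty parsed row); same cost, more idiomatic.


-- ===== PORT A =====
-- A's for-loop with `break`: structural recursion over data[start:], parsing each
-- row, stopping at the first all-empty parsed row, appending otherwise.
def csvA_loop : List String → List (List String)
  | [] => []
  | row :: rest =>
    let r := ((PySem.Str.split? row ",").getD []).map PySem.Str.strip
    if r.all (fun x => x == "") then [] else r :: csvA_loop rest

def csv_v0_get_section (data : List String) (start : Int) : List (List String) :=
  csvA_loop (PySem.List.slice data (some start) none)

-- ===== PORT B =====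
def csv_v0_get_section_alt (data : List String) (start : Int) : List (List String) :=
  let tail := PySem.List.slice data (some start) none
  let parsed := tail.map (fun row => ((PySem.Str.split? row ",").getD []).map PySem.Str.strip)
  let n := parsed.findIdx (fun r => r.all (fun x => x == ""))
  parsed.take n

-- ===== PRECONDITION & SPEC =====
def Spec_csv_v0_get_section (data : List String) (start : Int) (out : List (List String)) : Prop := out = csv_v0_get_section_alt data start
instance (data : List String) (start : Int) (out : List (List String)) : Decidable (Spec_csv_v0_get_section data start out) := by unfold Spec_csv_v0_get_section; infer_instance

-- ===== CLAIM (what is proved, stated in full; the proofs are below) =====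
def Claim_equal_csv_v0_get_section : Prop := ∀ (data : List String) (start : Int), Dom_csv_v0_get_section data start → Spec_csv_v0_get_section data start (csv_v0_get_section data start)

-- ===== LEMMAS AND PROOFS =====
theorem csvA_loop_eq_take_findIdx (l : List String) :
    csvA_loop l =
      (l.map (fun row => ((PySem.Str.split? row ",").getD []).map PySem.Str.strip)).take
        ((l.map (fun row => ((PySem.Str.split? row ",").getD []).map PySem.Str.strip)).findIdx
          (fun r => r.all (fun x => x == ""))) := by
  induction l with
  | nil => rfl
  | cons row rest ih =>
    simp only [csvA_loop, List.map_cons, List.findIdx_cons]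
    by_cases h : (((PySem.Str.split? row ",").getD []).map PySem.Str.strip).all (fun x => x == "") = true
    · simp [h]
    · simp [eq_false_of_ne_true h, ih]

-- ===== VERDICT (by name: the statement is the Claim_ definition above) =====
theorem csv_v0_get_section_spec : Claim_equal_csv_v0_get_section := by
  intro data start _
  unfold Spec_csv_v0_get_section csv_v0_get_section csv_v0_get_section_alt
  exact csvA_loop_eq_take_findIdx _
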